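-- pv_equiv track=rewrite | github.com/mastercoder0368/PSS-Watermark-Detection | src/pss_method/rolling_window_analyzer.py | longest_run_and_freq
-- ===== SOURCE A (Python) =====
-- from typing import List, Tuple, Dict
--
-- def longest_run_and_freq(window_bits: List[str]) -> Tuple[int, int]:
--     """
--     Find longest run of 1s and its frequency.
--
--     Args:
--         window_bits: List of '0'/'1' characters
--
--     Returns:
--         Tuple of (longest_run_length, frequency)
--     """
--     # Join bits and split by 0s to find runs of 1s
--     bit_string = "".join(window_bits)
--     runs = [len(r) for r in bit_string.split("0") if r]
--
--     if not runs:
--         return 0, 0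
--
--     longest = max(runs)
--     freq = runs.count(longest)
--
--     return longest, freq
-- ===== SOURCE B (Python) =====
-- def longest_run_and_freq(window_bits):
--     """One pass over the joined bits, tracking current run, longest, frequency."""
--     longest = 0
--     freq = 0
--     cur = 0
--     for c in "".join(window_bits):
--         if c != '0':
--             cur += 1
--         elif cur > longest:
--             longest, freq, cur = cur, 1, 0
--         elif cur == longest and cur > 0:
--             freq += 1
--             cur = 0
--         else:
--             cur = 0
--     if cur > longest:
--         longest, freq = cur, 1
--     elif cur == longest and cur > 0:
--         freq += 1
--     return longest, freq
-- ===== Notes on version B (the rewrite author's own statement) =====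
-- stated objective: alternative
-- what changed: Replaces A's join/split('0')/max/count pipeline (which materialises the list of runs and scans it twice) by a single pass over the joined string that tracks the current run length, the longest run and its frequency in three counters.
import Mathlib
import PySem

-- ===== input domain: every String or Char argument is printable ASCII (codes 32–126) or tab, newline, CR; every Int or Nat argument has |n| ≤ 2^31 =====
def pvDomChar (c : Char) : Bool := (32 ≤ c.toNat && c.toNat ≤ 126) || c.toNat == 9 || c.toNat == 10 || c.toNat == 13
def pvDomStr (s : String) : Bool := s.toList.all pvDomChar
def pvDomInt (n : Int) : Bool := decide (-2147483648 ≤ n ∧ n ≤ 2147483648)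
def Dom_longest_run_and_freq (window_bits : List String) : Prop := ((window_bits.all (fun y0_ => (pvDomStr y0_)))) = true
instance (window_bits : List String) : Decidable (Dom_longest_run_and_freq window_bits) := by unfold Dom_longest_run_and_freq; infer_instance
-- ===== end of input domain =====

-- B replaces A's join → split("0") → max → count pipeline by a single pass over the joined
-- bits carrying (longest, freq, current-run) counters; objective: alternative (one traversal,
-- no intermediate run list).

-- ===== PORT A =====
def longest_run_and_freq (window_bits : List String) : Int × Int :=
  -- bit_string = "".join(window_bits)
  let bit_string : List Char := PySem.Chars.join [] (window_bits.map String.toList)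
  -- runs = [len(r) for r in bit_string.split("0") if r]
  let runs : List Int :=
    ((PySem.Chars.splitOn bit_string ['0']).filter (fun r => !r.isEmpty)).map
      (fun r => (r.length : Int))
  if runs = [] then (0, 0)
  else
    match PySem.List.max? runs (fun x => x) with
    | none => (0, 0)   -- unreachable: runs ≠ []
    | some longest => (longest, (PySem.List.count runs longest : Int))

-- ===== PORT B =====
-- loop body of Source B: state = (longest, freq, cur)
def altStep (st : Int × Int × Int) (c : Char) : Int × Int × Int :=
  match st with
  | (longest, freq, cur) =>
    if c ≠ '0' then (longest, freq, cur + 1)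
    else if cur > longest then (cur, 1, 0)
    else if cur = longest ∧ cur > 0 then (longest, freq + 1, 0)
    else (longest, freq, 0)

def longest_run_and_freq_alt (window_bits : List String) : Int × Int :=
  let s : List Char := PySem.Chars.join [] (window_bits.map String.toList)
  match s.foldl altStep (0, 0, 0) with
  | (longest, freq, cur) =>
    if cur > longest then (cur, 1)
    else if cur = longest ∧ cur > 0 then (longest, freq + 1)
    else (longest, freq)

-- ===== PRECONDITION & SPEC =====
def Spec_longest_run_and_freq (window_bits : List String) (out : Int × Int) : Prop := out = longest_run_and_freq_alt window_bits
instance (window_bits : List String) (out : Int × Int) : Decidable (Spec_longest_run_and_freq window_bits out) := by unfold Spec_longest_run_and_freq; infer_instance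

-- ===== CLAIM (what is proved, stated in full; the proofs are below) =====
def Claim_equal_longest_run_and_freq : Prop := ∀ (window_bits : List String), Dom_longest_run_and_freq window_bits → Spec_longest_run_and_freq window_bits (longest_run_and_freq window_bits)

-- ===== LEMMAS AND PROOFS =====

def spl : List Char → List (List Char)
  | [] => [[]]
  | c :: cs => if c = '0' then [] :: spl cs else (spl cs).modifyHead (fun s => c :: s)

lemma spl_ne_nil (cs : List Char) : spl cs ≠ [] := by
  induction cs with
  | nil => simp [spl]
  | cons c cs ih =>
    simp only [spl]
    split_ifs
    · simp
    · rcases h : spl cs with _ | ⟨s0, rest⟩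
      · exact absurd h ih
      · simp [List.modifyHead]

lemma go_eq_spl (fuel : Nat) (l cur : List Char) (acc : List (List Char))
    (h : l.length < fuel) :
    PySem.Chars.splitOn.go ['0'] fuel l cur acc =
      acc.reverse ++ (spl l).modifyHead (fun s => cur.reverse ++ s) := by
  induction fuel generalizing l cur acc with
  | zero => omega
  | succ fuel ih =>
    cases l with
    | nil =>
      rw [PySem.Chars.splitOn.go]
      · simp [spl]
      · omega
    | cons c rest =>
      rw [PySem.Chars.splitOn.go]
      by_cases hc : c = '0'
      · subst hc
        have hp : List.isPrefixOf ['0'] ('0' :: rest) = true := by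
          simp [List.isPrefixOf]
        simp only [hp, if_true, List.length_cons] at *
        rw [ih _ _ _ (by simp; omega)]
        rcases hs : spl rest with _ | ⟨s0, srest⟩
        · exact absurd hs (spl_ne_nil rest)
        · simp [spl, hs, List.modifyHead]
      · have hp : List.isPrefixOf ['0'] (c :: rest) = false := by
          simp [List.isPrefixOf]
          intro h; exact hc h.symm
        simp only [hp, Bool.false_eq_true, if_false]
        rw [ih _ _ _ (by simp at h ⊢; omega)]
        simp only [spl, if_neg hc]
        rcases hs : spl rest with _ | ⟨s0, srest⟩
        · exact absurd hs (spl_ne_nil rest)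
        · simp [List.modifyHead]

lemma splitOn_eq_spl (cs : List Char) : PySem.Chars.splitOn cs ['0'] = spl cs := by
  unfold PySem.Chars.splitOn
  rw [go_eq_spl _ _ _ _ (by omega)]
  rcases hs : spl cs with _ | ⟨s0, srest⟩
  · exact absurd hs (spl_ne_nil cs)
  · simp [List.modifyHead]


def runsA (segs : List (List Char)) : List Int :=
  (segs.filter (fun r => !r.isEmpty)).map (fun r => (r.length : Int))

def runs' (k : Int) : List Char → List Int
  | [] => if 0 < k then [k] else []
  | c :: cs => if c = '0' then (if 0 < k then k :: runs' 0 cs else runs' 0 cs)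
               else runs' (k + 1) cs

lemma runsA_cons (s0 : List Char) (rest : List (List Char)) :
    runsA (s0 :: rest) = (if 0 < (s0.length : Int) then [(s0.length : Int)] else []) ++ runsA rest := by
  rcases s0 with _ | ⟨a, b⟩
  · simp [runsA]
  · have h : (0 : Int) < ((a :: b).length : Int) := by exact_mod_cast Nat.succ_pos b.length
    simp only [runsA, List.filter_cons, List.isEmpty_cons, Bool.not_false, if_pos h]
    simp

lemma runs'_eq (cs : List Char) : ∀ k : Int, 0 ≤ k →
    runs' k cs =
      (if 0 < k + ((spl cs).headI.length : Int) then [k + ((spl cs).headI.length : Int)] else [])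
        ++ runsA (spl cs).tail := by
  induction cs with
  | nil => intro k hk; simp [spl, runs', runsA]
  | cons c cs ih =>
    intro k hk
    rcases hs : spl cs with _ | ⟨s0, srest⟩
    · exact absurd hs (spl_ne_nil cs)
    by_cases hc : c = '0'
    · subst hc
      have h0 := ih 0 le_rfl
      rw [hs] at h0
      simp only [List.headI, List.tail, zero_add] at h0
      have h0' : runs' 0 cs = runsA (s0 :: srest) := by rw [h0, runsA_cons]
      have hspl : spl ('0' :: cs) = [] :: s0 :: srest := by simp [spl, hs]
      rw [hspl]
      simp only [runs', List.headI, List.tail, List.length_nil,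
        Nat.cast_zero, add_zero, h0']
      split_ifs <;> simp
    · have h1 := ih (k + 1) (by omega)
      rw [hs] at h1
      simp only [List.headI, List.tail] at h1
      have hspl : spl (c :: cs) = (c :: s0) :: srest := by
        simp [spl, hc, hs, List.modifyHead]
      rw [hspl]
      simp only [runs', if_neg hc, List.headI, List.tail, h1]
      have h2 : k + 1 + (s0.length : Int) = k + ((c :: s0).length : Int) := by
        simp only [List.length_cons]; push_cast; ring
      rw [h2]

lemma runs'_zero_eq_runsA (cs : List Char) : runs' 0 cs = runsA (spl cs) := by
  rw [runs'_eq cs 0 le_rfl]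
  rcases hs : spl cs with _ | ⟨s0, srest⟩
  · exact absurd hs (spl_ne_nil cs)
  · rw [runsA_cons]
    simp

lemma runsA_pos (segs : List (List Char)) : ∀ r ∈ runsA segs, 0 < r := by
  intro r hr
  simp only [runsA, List.mem_map, List.mem_filter] at hr
  obtain ⟨s, ⟨_, hs⟩, rfl⟩ := hr
  rcases s with _ | ⟨a, b⟩
  · simp at hs
  · exact_mod_cast Nat.succ_pos b.length


def upd (p : Int × Int) (r : Int) : Int × Int :=
  if r > p.1 then (r, 1) else if r = p.1 ∧ r > 0 then (p.1, p.2 + 1) else p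

lemma foldl_altStep_eq (cs : List Char) : ∀ L F k : Int, 0 ≤ L → 0 ≤ k →
    upd ((cs.foldl altStep (L, F, k)).1, (cs.foldl altStep (L, F, k)).2.1)
        (cs.foldl altStep (L, F, k)).2.2 =
      (runs' k cs).foldl upd (L, F) := by
  induction cs with
  | nil =>
    intro L F k hL hk
    simp only [List.foldl_nil, runs']
    by_cases hkp : 0 < k
    · simp [hkp, upd]
    · have hk0 : k = 0 := by omega
      subst hk0
      simp only [if_neg (by omega : ¬ (0:Int) < 0), List.foldl_nil, upd]
      rw [if_neg (by omega), if_neg (by simp)]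
  | cons c cs ih =>
    intro L F k hL hk
    by_cases hc : c = '0'
    · subst hc
      have hstep : altStep (L, F, k) '0' = ((upd (L, F) k).1, (upd (L, F) k).2, 0) := by
        simp only [altStep, upd]
        rw [if_neg (by simp)]
        split_ifs <;> rfl
      have hruns : runs' k ('0' :: cs) = (if 0 < k then k :: runs' 0 cs else runs' 0 cs) := by
        simp [runs']
      rw [List.foldl_cons, hstep, hruns]
      have hL' : 0 ≤ (upd (L, F) k).1 := by
        simp only [upd]; split_ifs
        · exact hk
        · exact hL
        · exact hL
      have hih := ih ((upd (L, F) k).1) ((upd (L, F) k).2) 0 hL' le_rfl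
      rw [hih]
      by_cases hkp : 0 < k
      · rw [if_pos hkp, List.foldl_cons, Prod.mk.eta]
      · have hk0 : k = 0 := by omega
        subst hk0
        rw [if_neg (by omega), Prod.mk.eta]
        congr 1
        simp only [upd]
        rw [if_neg (by omega), if_neg (by simp)]
    · have hstep : altStep (L, F, k) c = (L, F, k + 1) := by
        simp only [altStep]
        rw [if_pos hc]
      have hruns : runs' k (c :: cs) = runs' (k + 1) cs := by
        simp [runs', hc]
      rw [List.foldl_cons, hstep, hruns]
      exact ih L F (k + 1) hL (by omega)

lemma le_foldl_max_init (rl : List Int) (m : Int) : m ≤ rl.foldl max m := by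
  induction rl generalizing m with
  | nil => simp
  | cons r rest ih => exact le_trans (le_max_left m r) (ih (max m r))

lemma foldl_upd_eq (rl : List Int) : ∀ L F : Int, (∀ r ∈ rl, 0 < r) →
    rl.foldl upd (L, F) =
      (rl.foldl max L, (if rl.foldl max L = L then F else 0) + (rl.count (rl.foldl max L) : Int)) := by
  induction rl with
  | nil => intro L F _; simp
  | cons r rest ih =>
    intro L F hpos
    have hr : 0 < r := hpos r (by simp)
    have hrest : ∀ x ∈ rest, 0 < x := fun x hx => hpos x (by simp [hx])
    simp only [List.foldl_cons]
    rcases lt_trichotomy L r with h | h | h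
    · have hupd : upd (L, F) r = (r, 1) := by simp [upd, h]
      have hmax : max L r = r := by omega
      rw [hupd, ih _ _ hrest]
      simp only [hmax]
      have hMr : r ≤ rest.foldl max r := le_foldl_max_init rest r
      have hML : rest.foldl max r ≠ L := by omega
      rw [if_neg hML]
      simp only [Prod.mk.injEq, List.count_cons, true_and]
      by_cases hM : rest.foldl max r = r
      · rw [if_pos hM]
        have : (r == rest.foldl max r) = true := by simp [hM]
        rw [this, if_pos rfl]
        push_cast
        omega
      · rw [if_neg hM]
        have : (r == rest.foldl max r) = false := by simp; omega
        rw [this, if_neg Bool.false_ne_true]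
        push_cast
        omega
    · subst h
      have hupd : upd (L, F) L = (L, F + 1) := by
        simp only [upd]
        rw [if_neg (by omega), if_pos (by refine ⟨?_, hr⟩; first | rfl | trivial)]
      have hmax : max L L = L := max_self L
      rw [hupd, ih _ _ hrest]
      simp only [hmax, Prod.mk.injEq, List.count_cons, true_and]
      by_cases hM : rest.foldl max L = L
      · rw [if_pos hM, if_pos hM]
        have : (L == rest.foldl max L) = true := by simp [hM]
        rw [this, if_pos rfl]
        push_cast
        omega
      · rw [if_neg hM, if_neg hM]
        have : (L == rest.foldl max L) = false := by simp; omega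
        rw [this, if_neg Bool.false_ne_true]
        push_cast
        omega
    · have hupd : upd (L, F) r = (L, F) := by
        simp only [upd]
        rw [if_neg (by omega), if_neg (by rintro ⟨h1, h2⟩; omega)]
      have hmax : max L r = L := by omega
      rw [hupd, ih _ _ hrest]
      simp only [hmax, Prod.mk.injEq, List.count_cons, true_and]
      have hML : L ≤ rest.foldl max L := le_foldl_max_init rest L
      have : (r == rest.foldl max L) = false := by simp; omega
      rw [this, if_neg Bool.false_ne_true]
      push_cast
      omega

lemma max?_cons_cons (m r : Int) (rest : List Int) :
    PySem.List.max? (m :: r :: rest) (fun x => x) =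
      PySem.List.max? ((if m < r then r else m) :: rest) (fun x => x) := by
  simp only [PySem.List.max?, List.foldl_cons]
  split_ifs with h <;> simp

lemma max?_eq_foldl_max (rest : List Int) : ∀ m : Int,
    PySem.List.max? (m :: rest) (fun x => x) = some (rest.foldl max m) := by
  induction rest with
  | nil => intro m; simp [PySem.List.max?]
  | cons r rest ih =>
    intro m
    rw [max?_cons_cons, ih]
    have h1 : (if m < r then r else m) = max m r := by
      rw [max_def]; split_ifs <;> omega
    rw [h1, List.foldl_cons]

lemma alt_eq (w : List String) :
    longest_run_and_freq_alt w =
      (runsA (spl (PySem.Chars.join [] (w.map String.toList)))).foldl upd (0, 0) := by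
  unfold longest_run_and_freq_alt
  dsimp only
  rcases hst : (PySem.Chars.join [] (w.map String.toList)).foldl altStep (0, 0, 0) with ⟨l, f, c⟩
  have h := foldl_altStep_eq (PySem.Chars.join [] (w.map String.toList)) 0 0 0 le_rfl le_rfl
  rw [hst, runs'_zero_eq_runsA] at h
  rw [← h]
  rfl

lemma a_eq (w : List String) :
    longest_run_and_freq w =
      (runsA (spl (PySem.Chars.join [] (w.map String.toList)))).foldl upd (0, 0) := by
  unfold longest_run_and_freq
  dsimp only
  rw [splitOn_eq_spl]
  have hfilter : (((spl (PySem.Chars.join [] (w.map String.toList))).filter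
      (fun r => !r.isEmpty)).map (fun r => (r.length : Int))) =
      runsA (spl (PySem.Chars.join [] (w.map String.toList))) := rfl
  rw [hfilter]
  rcases hrl : runsA (spl (PySem.Chars.join [] (w.map String.toList))) with _ | ⟨r, rest⟩
  · simp
  · have hpos := runsA_pos (spl (PySem.Chars.join [] (w.map String.toList)))
    rw [hrl] at hpos
    have hr : 0 < r := hpos r (by simp)
    rw [if_neg (by simp), max?_eq_foldl_max, foldl_upd_eq _ 0 0 hpos]
    have hM0 : (r :: rest).foldl max 0 = rest.foldl max r := by
      simp only [List.foldl_cons]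
      rw [max_eq_right (by omega)]
    rw [hM0]
    have hMpos : 0 < rest.foldl max r := lt_of_lt_of_le hr (le_foldl_max_init rest r)
    rw [if_neg (by omega)]
    simp [PySem.List.count_eq]

-- ===== VERDICT (by name: the statement is the Claim_ definition above) =====
theorem longest_run_and_freq_spec : Claim_equal_longest_run_and_freq := by
  intro window_bits _
  unfold Spec_longest_run_and_freq
  rw [a_eq, alt_eq]
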